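-- pv_equiv track=rewrite | github.com/PytorchConnectomics/em_erl | em_erl/sampling.py | iter_z_chunks
-- ===== SOURCE A (Python) =====
-- def iter_z_chunks(total_z: int, chunk_num: int):
--     if chunk_num <= 1:
--         yield 0, total_z
--         return
--     for chunk_id in range(chunk_num):
--         z0 = (chunk_id * total_z) // chunk_num
--         z1 = ((chunk_id + 1) * total_z) // chunk_num
--         if z1 > z0:
--             yield z0, z1
-- ===== SOURCE B (Python) =====
-- def iter_z_chunks(total_z: int, chunk_num: int):
--     # Bresenham-style: one divmod up front, then only additions/comparisons.
--     if chunk_num <= 1: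
--         yield 0, total_z
--         return
--     q, r = divmod(total_z, chunk_num)
--     z = 0
--     err = 0
--     for _ in range(chunk_num):
--         err += r
--         step = q
--         if err >= chunk_num:
--             step += 1
--             err -= chunk_num
--         if step > 0:
--             yield z, z + step
--         z += step
-- ===== Notes on version B (the rewrite author's own statement) =====
-- stated objective: alternative
-- what changed: B replaces the two floor divisions per iteration with a single up-front divmod plus a Bresenham-style error accumulator: each chunk size is the base quotient plus a carry when the accumulated remainder overflows, so the loop runs on additions and comparisons only.
import Mathlib
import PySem

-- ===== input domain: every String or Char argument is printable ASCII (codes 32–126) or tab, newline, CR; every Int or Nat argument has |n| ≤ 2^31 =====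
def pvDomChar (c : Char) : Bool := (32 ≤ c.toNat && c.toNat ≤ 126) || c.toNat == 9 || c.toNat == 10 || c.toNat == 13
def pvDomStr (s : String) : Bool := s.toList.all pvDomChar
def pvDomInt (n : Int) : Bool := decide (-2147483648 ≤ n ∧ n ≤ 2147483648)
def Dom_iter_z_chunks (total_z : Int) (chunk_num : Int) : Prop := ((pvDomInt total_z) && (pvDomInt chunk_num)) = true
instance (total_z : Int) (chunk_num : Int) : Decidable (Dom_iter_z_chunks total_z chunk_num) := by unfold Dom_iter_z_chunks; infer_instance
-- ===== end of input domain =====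

-- B replaces the two floor divisions per iteration by a single up-front divmod plus a
-- Bresenham-style error accumulator (an alternative algorithm of the same asymptotic cost).

-- ===== PORT A =====
def iter_z_chunks (total_z : Int) (chunk_num : Int) : List (Int × Int) :=
  if chunk_num ≤ 1 then [(0, total_z)]
  else
    (PySem.List.pyRange 0 chunk_num 1).foldl (fun acc chunk_id =>
      let z0 := PySem.Int.floordiv (chunk_id * total_z) chunk_num
      let z1 := PySem.Int.floordiv ((chunk_id + 1) * total_z) chunk_num
      if z1 > z0 then acc ++ [(z0, z1)] else acc) []

-- ===== PORT B =====
-- divmod(total_z, chunk_num) ported as (floordiv, mod); chunk_num ≥ 2 here so it never raises.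
def iter_z_chunks_alt (total_z : Int) (chunk_num : Int) : List (Int × Int) :=
  if chunk_num ≤ 1 then [(0, total_z)]
  else
    let q := PySem.Int.floordiv total_z chunk_num
    let r := PySem.Int.mod total_z chunk_num
    let fin := (PySem.List.pyRange 0 chunk_num 1).foldl
      (fun (s : Int × Int × List (Int × Int)) _ =>
        let z := s.1
        let err := s.2.1 + r
        let step := if err ≥ chunk_num then q + 1 else q
        let err := if err ≥ chunk_num then err - chunk_num else err
        let acc := if step > 0 then s.2.2 ++ [(z, z + step)] else s.2.2
        (z + step, err, acc)) (0, 0, [])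
    fin.2.2

-- ===== PRECONDITION & SPEC =====
def Spec_iter_z_chunks (total_z : Int) (chunk_num : Int) (out : List (Int × Int)) : Prop := out = iter_z_chunks_alt total_z chunk_num
instance (total_z : Int) (chunk_num : Int) (out : List (Int × Int)) : Decidable (Spec_iter_z_chunks total_z chunk_num out) := by unfold Spec_iter_z_chunks; infer_instance

-- ===== CLAIM (what is proved, stated in full; the proofs are below) =====
def Claim_equal_iter_z_chunks : Prop := ∀ (total_z : Int) (chunk_num : Int), Dom_iter_z_chunks total_z chunk_num → Spec_iter_z_chunks total_z chunk_num (iter_z_chunks total_z chunk_num)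

-- ===== LEMMAS AND PROOFS =====

-- uniqueness of floor division for a positive divisor
theorem fdiv_unique (n k d : Int) (hn : 0 < n) (hd0 : 0 ≤ d) (hdn : d < n) :
    PySem.Int.floordiv (n * k + d) n = k ∧ PySem.Int.mod (n * k + d) n = d := by
  rw [PySem.Int.floordiv_eq_ediv_of_pos hn, PySem.Int.mod_eq_emod_of_pos hn]
  constructor
  · have h1 : (n * k + d) / n = d / n + k := by
      rw [add_comm, mul_comm]; exact Int.add_mul_ediv_right d k (by omega)
    rw [h1, Int.ediv_eq_zero_of_lt hd0 hdn]; omega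
  · have h2 : (n * k + d) % n = d % n := by
      rw [add_comm]; exact Int.add_mul_emod_self_left d n k
    rw [h2, Int.emod_eq_of_lt hd0 hdn]

-- one step of the Bresenham recurrence: how floordiv ((i+1)*T) n and mod ((i+1)*T) n
-- evolve from the values at i, given q = T // n, r = T % n.
theorem bres_step (T n i : Int) (hn : 0 < n) :
    (PySem.Int.mod (i * T) n + PySem.Int.mod T n ≥ n →
      PySem.Int.floordiv ((i + 1) * T) n
        = PySem.Int.floordiv (i * T) n + (PySem.Int.floordiv T n + 1) ∧
      PySem.Int.mod ((i + 1) * T) n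
        = PySem.Int.mod (i * T) n + PySem.Int.mod T n - n) ∧
    (¬ (PySem.Int.mod (i * T) n + PySem.Int.mod T n ≥ n) →
      PySem.Int.floordiv ((i + 1) * T) n
        = PySem.Int.floordiv (i * T) n + PySem.Int.floordiv T n ∧
      PySem.Int.mod ((i + 1) * T) n
        = PySem.Int.mod (i * T) n + PySem.Int.mod T n) := by
  have hA := PySem.Int.floordiv_mul_add_mod (i * T) n
  have hB := PySem.Int.floordiv_mul_add_mod T n
  have hA1 : 0 ≤ PySem.Int.mod (i * T) n := by
    rw [PySem.Int.mod_eq_emod_of_pos hn]; exact Int.emod_nonneg _ (by omega)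
  have hA2 : PySem.Int.mod (i * T) n < n := by
    rw [PySem.Int.mod_eq_emod_of_pos hn]; exact Int.emod_lt_of_pos _ hn
  have hB1 : 0 ≤ PySem.Int.mod T n := by
    rw [PySem.Int.mod_eq_emod_of_pos hn]; exact Int.emod_nonneg _ (by omega)
  have hB2 : PySem.Int.mod T n < n := by
    rw [PySem.Int.mod_eq_emod_of_pos hn]; exact Int.emod_lt_of_pos _ hn
  constructor
  · intro hge
    have key : (i + 1) * T
        = n * (PySem.Int.floordiv (i * T) n + (PySem.Int.floordiv T n + 1))
          + (PySem.Int.mod (i * T) n + PySem.Int.mod T n - n) := by ring_nf; nlinarith [hA, hB]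
    have := fdiv_unique n (PySem.Int.floordiv (i * T) n + (PySem.Int.floordiv T n + 1))
      (PySem.Int.mod (i * T) n + PySem.Int.mod T n - n) hn (by omega) (by omega)
    rw [key]; exact this
  · intro hlt
    have key : (i + 1) * T
        = n * (PySem.Int.floordiv (i * T) n + PySem.Int.floordiv T n)
          + (PySem.Int.mod (i * T) n + PySem.Int.mod T n) := by ring_nf; nlinarith [hA, hB]
    have := fdiv_unique n (PySem.Int.floordiv (i * T) n + PySem.Int.floordiv T n)
      (PySem.Int.mod (i * T) n + PySem.Int.mod T n) hn (by omega) (by omega)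
    rw [key]; exact this

-- main loop correspondence: B's stateful fold over pyRange i n 1, started at the invariant
-- state for index i, produces the same accumulator as A's fold over the same range.
theorem loop_eq (T n : Int) (hn : 1 < n) :
    ∀ (N : Nat) (i : Int), (n - i).toNat = N →
    ∀ (acc : List (Int × Int)),
    ((PySem.List.pyRange i n 1).foldl
      (fun (s : Int × Int × List (Int × Int)) _ =>
        let z := s.1
        let err := s.2.1 + PySem.Int.mod T n
        let step := if err ≥ n then PySem.Int.floordiv T n + 1 else PySem.Int.floordiv T n
        let err := if err ≥ n then err - n else err
        let acc := if step > 0 then s.2.2 ++ [(z, z + step)] else s.2.2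
        (z + step, err, acc))
      (PySem.Int.floordiv (i * T) n, PySem.Int.mod (i * T) n, acc)).2.2
    = (PySem.List.pyRange i n 1).foldl (fun acc chunk_id =>
        let z0 := PySem.Int.floordiv (chunk_id * T) n
        let z1 := PySem.Int.floordiv ((chunk_id + 1) * T) n
        if z1 > z0 then acc ++ [(z0, z1)] else acc) acc := by
  intro N
  induction N with
  | zero =>
    intro i hNi acc
    rw [PySem.List.pyRange_one_eq_nil (by omega)]
    simp
  | succ m ih =>
    intro i hNi acc
    have hilt : i < n := by omega
    rw [PySem.List.pyRange_one_cons hilt]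
    simp only [List.foldl_cons]
    have hstep := bres_step T n i (by omega)
    by_cases hc : PySem.Int.mod (i * T) n + PySem.Int.mod T n ≥ n
    · obtain ⟨hfd, hmd⟩ := hstep.1 hc
      have hz : PySem.Int.floordiv (i * T) n + (PySem.Int.floordiv T n + 1)
          = PySem.Int.floordiv ((i + 1) * T) n := hfd.symm
      have he : PySem.Int.mod (i * T) n + PySem.Int.mod T n - n
          = PySem.Int.mod ((i + 1) * T) n := hmd.symm
      simp only [if_pos hc]
      rw [hz, he]
      by_cases hpos : 0 < PySem.Int.floordiv T n + 1
      · have hpos' : PySem.Int.floordiv (i * T) n < PySem.Int.floordiv ((i + 1) * T) n := by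
          omega
        simp only [if_pos hpos, if_pos hpos']
        exact ih (i + 1) (by omega) _
      · have hpos' : ¬ PySem.Int.floordiv (i * T) n < PySem.Int.floordiv ((i + 1) * T) n := by
          omega
        simp only [if_neg hpos, if_neg hpos']
        exact ih (i + 1) (by omega) _
    · obtain ⟨hfd, hmd⟩ := hstep.2 hc
      have hz : PySem.Int.floordiv (i * T) n + PySem.Int.floordiv T n
          = PySem.Int.floordiv ((i + 1) * T) n := hfd.symm
      have he : PySem.Int.mod (i * T) n + PySem.Int.mod T n
          = PySem.Int.mod ((i + 1) * T) n := hmd.symm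
      simp only [if_neg hc]
      by_cases hpos : 0 < PySem.Int.floordiv T n
      · have hpos' : PySem.Int.floordiv (i * T) n < PySem.Int.floordiv ((i + 1) * T) n := by
          omega
        simp only [if_pos hpos, if_pos hpos', hz, he]
        exact ih (i + 1) (by omega) _
      · have hpos' : ¬ PySem.Int.floordiv (i * T) n < PySem.Int.floordiv ((i + 1) * T) n := by
          omega
        simp only [if_neg hpos, if_neg hpos', hz, he]
        exact ih (i + 1) (by omega) _

-- ===== VERDICT (by name: the statement is the Claim_ definition above) =====
theorem iter_z_chunks_spec : Claim_equal_iter_z_chunks := by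
  intro total_z chunk_num _
  unfold Spec_iter_z_chunks iter_z_chunks iter_z_chunks_alt
  by_cases h : chunk_num ≤ 1
  · simp [h]
  · simp only [if_neg h]
    have hn : 1 < chunk_num := by omega
    have h0 : PySem.Int.floordiv (0 * total_z) chunk_num = 0 := by
      rw [PySem.Int.floordiv_eq_ediv_of_pos (by omega)]; simp
    have h0' : PySem.Int.mod (0 * total_z) chunk_num = 0 := by
      rw [PySem.Int.mod_eq_emod_of_pos (by omega)]; simp
    have := loop_eq total_z chunk_num hn (chunk_num - 0).toNat 0 rfl []
    rw [h0, h0'] at this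
    simp only [gt_iff_lt]
    rw [← this]
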